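-- pv_equiv track=rewrite | github.com/Narturn/dau-tranhoanggiao-doangiaithuat | 1941-CheckifAllCharactersHaveEqualNumberofOccurrences.py | areOccurrencesEqual
-- ===== SOURCE A (Python) =====
-- def areOccurrencesEqual(s):
--     count = {}
--
--     for i in s:
--         count[i] = count.get(i, 0) + 1
--
--     for i in s:
--         if count[s[0]] != count[i]:
--             return False
--
--     return True
-- ===== SOURCE B (Python) =====
-- def areOccurrencesEqual(s):
--     distinct_counts = {s.count(c) for c in set(s)}
--     return len(distinct_counts) <= 1
-- ===== Notes on version B (the rewrite author's own statement) =====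
-- stated objective: simpler
-- what changed: Replaced the dict-accumulation loop plus a second early-return scan of s with a one-liner: collect each distinct character's s.count into a set and test that at most one distinct count value exists.
import Mathlib
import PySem

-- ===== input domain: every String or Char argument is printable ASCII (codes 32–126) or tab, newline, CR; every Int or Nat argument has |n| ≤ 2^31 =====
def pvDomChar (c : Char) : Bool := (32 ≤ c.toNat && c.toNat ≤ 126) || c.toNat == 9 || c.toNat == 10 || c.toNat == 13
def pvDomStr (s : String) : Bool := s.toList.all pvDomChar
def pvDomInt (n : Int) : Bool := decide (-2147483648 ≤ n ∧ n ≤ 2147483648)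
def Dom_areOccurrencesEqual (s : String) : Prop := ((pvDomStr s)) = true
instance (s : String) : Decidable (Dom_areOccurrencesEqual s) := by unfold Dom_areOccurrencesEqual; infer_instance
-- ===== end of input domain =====

-- B replaces A's count-then-rescan with a set comprehension of count values tested for ≤ 1 element (simpler).

-- ===== PORT A =====
-- second loop of A: for i in s: if count[s[0]] != count[i]: return False
def pvALoop (count : PySem.Dict Char Int) (c0 : Char) : List Char → Bool
  | [] => true
  | i :: rest => if count.getD c0 0 != count.getD i 0 then false else pvALoop count c0 rest

def areOccurrencesEqual (s : String) : Bool :=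
  let count := s.toList.foldl (fun d i => d.insert i (d.getD i 0 + 1)) (PySem.Dict.empty)
  -- s[0] is only evaluated inside the loop, where s is necessarily nonempty
  match s.toList with
  | [] => true
  | c0 :: _ => pvALoop count c0 s.toList

-- ===== PORT B =====
def areOccurrencesEqual_alt (s : String) : Bool :=
  -- s.count(c) for a single character c is the character count (exact on chars)
  let distinct_counts : PySem.Set Int :=
    PySem.Set.ofList ((PySem.Set.ofList s.toList).map (fun c => (s.toList.count c : Int)))
  decide (PySem.Set.len distinct_counts ≤ 1)

-- ===== PRECONDITION & SPEC =====
def Spec_areOccurrencesEqual (s : String) (out : Bool) : Prop := out = areOccurrencesEqual_alt s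
instance (s : String) (out : Bool) : Decidable (Spec_areOccurrencesEqual s out) := by unfold Spec_areOccurrencesEqual; infer_instance

-- ===== CLAIM (what is proved, stated in full; the proofs are below) =====
def Claim_equal_areOccurrencesEqual : Prop := ∀ (s : String), Dom_areOccurrencesEqual s → Spec_areOccurrencesEqual s (areOccurrencesEqual s)

-- ===== LEMMAS AND PROOFS =====

theorem pvALoop_eq_all (count : PySem.Dict Char Int) (c0 : Char) (l : List Char) :
    pvALoop count c0 l = l.all (fun i => count.getD c0 0 == count.getD i 0) := by
  induction l with
  | nil => rfl
  | cons i rest ih =>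
    simp [pvALoop, List.all_cons, ih]
    by_cases h : count.getD c0 0 = count.getD i 0 <;> simp [h]

-- a nodup list has length ≤ 1 iff any two members coincide
theorem len_ofList_le_one_iff {α : Type} [DecidableEq α] (xs : List α) :
    (PySem.Set.ofList xs).length ≤ 1 ↔ ∀ x ∈ xs, ∀ y ∈ xs, x = y := by
  constructor
  · intro h x hx y hy
    have hx' : x ∈ PySem.Set.ofList xs := (PySem.Set.mem_ofList _ _).2 hx
    have hy' : y ∈ PySem.Set.ofList xs := (PySem.Set.mem_ofList _ _).2 hy
    match hl : PySem.Set.ofList xs with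
    | [] => rw [hl] at hx'; simp at hx'
    | [a] =>
      rw [hl] at hx' hy'; simp at hx' hy'; rw [hx', hy']
    | a :: b :: t => rw [hl] at h; simp at h
  · intro h
    match hl : PySem.Set.ofList xs with
    | [] => simp
    | [a] => simp
    | a :: b :: t =>
      have ha : a ∈ PySem.Set.ofList xs := by rw [hl]; simp
      have hb : b ∈ PySem.Set.ofList xs := by rw [hl]; simp
      have hnd := PySem.Set.nodup_ofList (xs := xs)
      rw [hl] at hnd
      have : a = b := h a ((PySem.Set.mem_ofList _ _).1 ha) b ((PySem.Set.mem_ofList _ _).1 hb)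
      simp [this] at hnd

theorem areOccurrencesEqual_eq (s : String) :
    areOccurrencesEqual s = areOccurrencesEqual_alt s := by
  unfold areOccurrencesEqual areOccurrencesEqual_alt
  simp only [PySem.Set.len]
  cases hm : s.toList with
  | nil => simp [PySem.Set.ofList]
  | cons c0 rest =>
    dsimp only
    rw [pvALoop_eq_all]
    simp only [PySem.Dict.foldl_insert_getD_add_one_eq_counter, PySem.Dict.getD_counter]
    rw [Bool.eq_iff_iff, List.all_eq_true, decide_eq_true_eq, Nat.cast_le_one, len_ofList_le_one_iff]
    constructor
    · intro h x hx y hy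
      obtain ⟨cx, hcx, rfl⟩ := List.mem_map.1 hx
      obtain ⟨cy, hcy, rfl⟩ := List.mem_map.1 hy
      have h1 := h cx ((PySem.Set.mem_ofList _ _).1 hcx)
      have h2 := h cy ((PySem.Set.mem_ofList _ _).1 hcy)
      rw [beq_iff_eq] at h1 h2
      omega
    · intro h i hi
      rw [beq_iff_eq]
      exact h _ (List.mem_map.2 ⟨c0, (PySem.Set.mem_ofList _ _).2 (by simp), rfl⟩)
              _ (List.mem_map.2 ⟨i, (PySem.Set.mem_ofList _ _).2 hi, rfl⟩)

-- ===== VERDICT (by name: the statement is the Claim_ definition above) =====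
theorem areOccurrencesEqual_spec : Claim_equal_areOccurrencesEqual := by
  intro s _
  exact areOccurrencesEqual_eq s
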